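-- pv_equiv track=rewrite | github.com/Humanitariansai/Madison | SurveyAnalysis/musical_sentimentanalysis.py | interpret_themes
-- ===== SOURCE A (Python) =====
-- def interpret_themes(top_terms):
--     """Intelligently categorize themes based on keywords"""
--     interpretations = {}
--
--     for i, keywords in enumerate(top_terms):
--         keywords_str = ' '.join(keywords).lower()
--
--         # Identify theme based on keyword patterns
--         if any(word in keywords_str for word in ['cable', 'string', 'pick', 'case', 'stand', 'strap']):
--             theme_type = "Accessories & Parts"
--         elif any(word in keywords_str for word in ['sound', 'tone', 'audio', 'quality', 'clear', 'recording']):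
--             theme_type = "Sound Quality"
--         elif any(word in keywords_str for word in ['price', 'money', 'worth', 'cheap', 'expensive', 'value']):
--             theme_type = "Value & Pricing"
--         elif any(word in keywords_str for word in ['broke', 'broken', 'failed', 'stopped', 'issue', 'problem']):
--             theme_type = "Durability Issues"
--         elif any(word in keywords_str for word in ['guitar', 'fret', 'neck', 'strings', 'tuning']):
--             theme_type = "Guitar Features"
--         elif any(word in keywords_str for word in ['professional', 'studio', 'fender', 'yamaha', 'brand']):
--             theme_type = "Professional/Brand"
--         else:
--             theme_type = "General Satisfaction"
--
--         interpretations[i] = theme_type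
--
--     return interpretations
-- ===== SOURCE B (Python) =====
-- THEMES = [
--     ("Accessories & Parts", ['cable', 'string', 'pick', 'case', 'stand', 'strap']),
--     ("Sound Quality", ['sound', 'tone', 'audio', 'quality', 'clear', 'recording']),
--     ("Value & Pricing", ['price', 'money', 'worth', 'cheap', 'expensive', 'value']),
--     ("Durability Issues", ['broke', 'broken', 'failed', 'stopped', 'issue', 'problem']),
--     ("Guitar Features", ['guitar', 'fret', 'neck', 'strings', 'tuning']),
--     ("Professional/Brand", ['professional', 'studio', 'fender', 'yamaha', 'brand']),
-- ]
--
-- def interpret_themes(top_terms):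
--     """Staged passes: join+lower every item once, start everything at the default
--     label, then sweep the categories from LOWEST to HIGHEST priority, each sweep
--     overwriting the label of every item it matches; the last (highest-priority)
--     matching sweep wins, which is exactly the elif priority."""
--     texts = [' '.join(kw).lower() for kw in top_terms]
--     labels = ["General Satisfaction"] * len(texts)
--     for name, words in reversed(THEMES):
--         labels = [name if any(w in t for w in words) else lab
--                   for t, lab in zip(texts, labels)]
--     return dict(enumerate(labels))
-- ===== Notes on version B (the rewrite author's own statement) =====
-- stated objective: alternative
-- what changed: Replaces the per-item if/elif first-match chain with staged whole-list passes: labels start at the default and each category, swept from lowest to highest priority, overwrites the labels of the items it matches, so the final overwrite realises the elif priority.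
import Mathlib
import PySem

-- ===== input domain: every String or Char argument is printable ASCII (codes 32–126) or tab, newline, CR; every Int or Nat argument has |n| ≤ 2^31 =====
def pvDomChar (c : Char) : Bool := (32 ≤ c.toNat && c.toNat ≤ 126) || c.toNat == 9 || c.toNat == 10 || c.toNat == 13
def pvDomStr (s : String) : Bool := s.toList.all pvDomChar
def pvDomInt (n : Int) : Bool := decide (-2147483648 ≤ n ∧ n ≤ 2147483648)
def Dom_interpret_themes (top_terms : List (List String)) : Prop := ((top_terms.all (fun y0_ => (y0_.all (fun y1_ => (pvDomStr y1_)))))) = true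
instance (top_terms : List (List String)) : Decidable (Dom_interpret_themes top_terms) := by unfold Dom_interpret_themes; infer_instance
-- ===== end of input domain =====

-- B replaces A's per-item if/elif chain and dict-mutating loop with staged whole-list
-- passes: categories swept lowest-to-highest priority, each overwriting matching items'
-- labels (objective: alternative; same cost, different traversal).


-- ===== PORT A =====
-- loop body of A: join, lower, then the if/elif chain
def pvThemeA (keywords : List String) : String :=
  let ks := PySem.Str.lower (PySem.Str.join " " keywords)
  if (["cable", "string", "pick", "case", "stand", "strap"].any (fun w => PySem.Str.isIn w ks)) then
    "Accessories & Parts"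
  else if (["sound", "tone", "audio", "quality", "clear", "recording"].any (fun w => PySem.Str.isIn w ks)) then
    "Sound Quality"
  else if (["price", "money", "worth", "cheap", "expensive", "value"].any (fun w => PySem.Str.isIn w ks)) then
    "Value & Pricing"
  else if (["broke", "broken", "failed", "stopped", "issue", "problem"].any (fun w => PySem.Str.isIn w ks)) then
    "Durability Issues"
  else if (["guitar", "fret", "neck", "strings", "tuning"].any (fun w => PySem.Str.isIn w ks)) then
    "Guitar Features"
  else if (["professional", "studio", "fender", "yamaha", "brand"].any (fun w => PySem.Str.isIn w ks)) then
    "Professional/Brand"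
  else
    "General Satisfaction"

def interpret_themes (top_terms : List (List String)) : List (Int × String) :=
  ((PySem.List.enumerate top_terms 0).foldl
    (fun d p => d.insert p.1 (pvThemeA p.2))
    (PySem.Dict.empty : PySem.Dict Int String)).items

-- ===== PORT B =====
def pvThemes : List (String × List String) :=
  [("Accessories & Parts", ["cable", "string", "pick", "case", "stand", "strap"]),
   ("Sound Quality", ["sound", "tone", "audio", "quality", "clear", "recording"]),
   ("Value & Pricing", ["price", "money", "worth", "cheap", "expensive", "value"]),
   ("Durability Issues", ["broke", "broken", "failed", "stopped", "issue", "problem"]),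
   ("Guitar Features", ["guitar", "fret", "neck", "strings", "tuning"]),
   ("Professional/Brand", ["professional", "studio", "fender", "yamaha", "brand"])]

-- texts = [' '.join(kw).lower() for kw in top_terms]
def pvText (keywords : List String) : String :=
  PySem.Str.lower (PySem.Str.join " " keywords)

-- one sweep: overwrite the label of every item the category matches
def pvSweep (texts : List String) (ls : List String) (c : String × List String) : List String :=
  (texts.zip ls).map (fun p => if c.2.any (fun w => PySem.Str.isIn w p.1) then c.1 else p.2)

def interpret_themes_alt (top_terms : List (List String)) : List (Int × String) :=
  let texts := top_terms.map pvText
  let labels := List.replicate texts.length "General Satisfaction"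
  let final := pvThemes.reverse.foldl (pvSweep texts) labels
  PySem.List.enumerate final 0

-- ===== PRECONDITION & SPEC =====
def Spec_interpret_themes (top_terms : List (List String)) (out : List (Int × String)) : Prop := out = interpret_themes_alt top_terms
instance (top_terms : List (List String)) (out : List (Int × String)) : Decidable (Spec_interpret_themes top_terms out) := by unfold Spec_interpret_themes; infer_instance

-- ===== CLAIM (what is proved, stated in full; the proofs are below) =====
def Claim_equal_interpret_themes : Prop := ∀ (top_terms : List (List String)), Dom_interpret_themes top_terms → Spec_interpret_themes top_terms (interpret_themes top_terms)

-- ===== LEMMAS AND PROOFS =====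
-- sweeping a whole list pointwise commutes with per-element folding
theorem pvSweep_foldl (cats : List (String × List String)) (texts : List String)
    (g : String → String) :
    cats.foldl (pvSweep texts) (texts.map g) =
      texts.map (fun t =>
        cats.foldl (fun a c => if c.2.any (fun w => PySem.Str.isIn w t) then c.1 else a) (g t)) := by
  induction cats generalizing g with
  | nil => simp
  | cons c cs ih =>
    simp only [List.foldl_cons]
    have hstep : pvSweep texts (texts.map g) c =
        texts.map (fun t => if c.2.any (fun w => PySem.Str.isIn w t) then c.1 else g t) := by
      have hz : texts.zip (texts.map g) = texts.map (fun t => (t, g t)) := by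
        have := List.zip_map' (α := String) (f := id) (g := g) (l := texts)
        simpa using this
      simp [pvSweep, hz, List.map_map]
    rw [hstep, ih]

-- per item: the reverse-order overwrite fold produces A's if/elif result
theorem pvFold_eq_themeA (keywords : List String) :
    pvThemes.foldr
      (fun c a => if c.2.any (fun w => PySem.Str.isIn w (pvText keywords)) then c.1 else a)
      "General Satisfaction" = pvThemeA keywords := by
  simp [pvThemes, pvThemeA, pvText]

-- enumerate of a mapped list
theorem pvEnumerate_map {α β : Type} (f : α → β) (xs : List α) (s : Int) :
    PySem.List.enumerate (xs.map f) s =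
      (PySem.List.enumerate xs s).map (fun p => (p.1, f p.2)) := by
  induction xs generalizing s with
  | nil => simp [PySem.List.enumerate_nil]
  | cons x xs ih => simp [PySem.List.enumerate_cons, ih]

-- ===== VERDICT (by name: the statement is the Claim_ definition above) =====
theorem interpret_themes_spec : Claim_equal_interpret_themes := by
  intro top_terms _
  unfold Spec_interpret_themes interpret_themes interpret_themes_alt
  refine (PySem.Dict.items_foldl_insert_fresh (PySem.List.enumerate top_terms 0)
    (fun p => p.1) (fun p => pvThemeA p.2) PySem.Dict.empty
    (fun a _ => PySem.Dict.contains_empty a.1)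
    (by rw [PySem.List.map_fst_enumerate]; exact PySem.List.nodup_pyRange_one 0 (0 + top_terms.length))).trans ?_
  show _ = PySem.List.enumerate
      (pvThemes.reverse.foldl (pvSweep (top_terms.map pvText))
        (List.replicate (top_terms.map pvText).length "General Satisfaction")) 0
  have hrep : List.replicate (top_terms.map pvText).length "General Satisfaction" =
      (top_terms.map pvText).map (fun _ => "General Satisfaction") := by
    simp only [List.map_const', List.length_map]
  rw [hrep, pvSweep_foldl, List.map_map, pvEnumerate_map]
  simp [PySem.Dict.empty, List.foldl_reverse]
  intro a b _
  simpa using (pvFold_eq_themeA b).symm
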